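-- pv_equiv track=rewrite | github.com/jtraub91/bits | src/bits/bips/bip380.py | descsum_check
-- ===== SOURCE A (Python) =====
-- INPUT_CHARSET = "0123456789()[],'/*abcdefgh@:$%{}IJKLMNOPQRSTUVWXYZ&+-.;<=>?!^_|~ijklmnopqrstuvwxyzABCDEFGH`#\"\\ "
--
-- CHECKSUM_CHARSET = "qpzry9x8gf2tvdw0s3jn54khce6mua7l"
--
-- GENERATOR = [0xF5DEE51989, 0xA9FDCA3312, 0x1BAB10E32D, 0x3706B1677A, 0x644D626FFD]
--
-- def descsum_polymod(symbols):
--     """Internal function that computes the descriptor checksum."""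
--     chk = 1
--     for value in symbols:
--         top = chk >> 35
--         chk = (chk & 0x7FFFFFFFF) << 5 ^ value
--         for i in range(5):
--             chk ^= GENERATOR[i] if ((top >> i) & 1) else 0
--     return chk
--
-- def descsum_expand(s):
--     """Internal function that does the character to symbol expansion"""
--     groups = []
--     symbols = []
--     for c in s:
--         if not c in INPUT_CHARSET:
--             return None
--         v = INPUT_CHARSET.find(c)
--         symbols.append(v & 31)
--         groups.append(v >> 5)
--         if len(groups) == 3:
--             symbols.append(groups[0] * 9 + groups[1] * 3 + groups[2])
--             groups = []
--     if len(groups) == 1: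
--         symbols.append(groups[0])
--     elif len(groups) == 2:
--         symbols.append(groups[0] * 3 + groups[1])
--     return symbols
--
-- def descsum_check(s, require=True):
--     """Verify that the checksum is correct in a descriptor"""
--     if not "#" in s:
--         return not require
--     if s[-9] != "#":
--         return False
--     if not all(x in CHECKSUM_CHARSET for x in s[-8:]):
--         return False
--     symbols = descsum_expand(s[:-9]) + [CHECKSUM_CHARSET.find(x) for x in s[-8:]]
--     return descsum_polymod(symbols) == 1
-- ===== SOURCE B (Python) =====
-- INPUT_CHARSET = "0123456789()[],'/*abcdefgh@:$%{}IJKLMNOPQRSTUVWXYZ&+-.;<=>?!^_|~ijklmnopqrstuvwxyzABCDEFGH`#\"\\ "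
--
-- CHECKSUM_CHARSET = "qpzry9x8gf2tvdw0s3jn54khce6mua7l"
--
-- GENERATOR = [0xF5DEE51989, 0xA9FDCA3312, 0x1BAB10E32D, 0x3706B1677A, 0x644D626FFD]
--
-- INP_IDX = {c: i for i, c in enumerate(INPUT_CHARSET)}
-- CHK_IDX = {c: i for i, c in enumerate(CHECKSUM_CHARSET)}
--
-- # 32-entry table: for each 5-bit "top", the XOR of the generator constants it selects;
-- # replaces the per-symbol inner loop of the original polymod with one table lookup.
-- def _xor_table():
--     tbl = []
--     for m in range(32):
--         acc = 0
--         for i in range(5):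
--             if (m >> i) & 1:
--                 acc ^= GENERATOR[i]
--         tbl.append(acc)
--     return tbl
--
-- TBL = _xor_table()
--
-- def _polymod(symbols):
--     chk = 1
--     for v in symbols:
--         chk = ((chk & 0x7FFFFFFFF) << 5) ^ v ^ TBL[chk >> 35]
--     return chk
--
-- def _expand(body):
--     """Symbol expansion, iterating the body in chunks of three characters."""
--     syms = []
--     for i in range(0, len(body), 3):
--         vs = []
--         for c in body[i:i + 3]:
--             v = INP_IDX.get(c)
--             if v is None:
--                 return None
--             syms.append(v & 31)
--             vs.append(v >> 5)
--         if len(vs) == 3: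
--             syms.append(vs[0] * 9 + vs[1] * 3 + vs[2])
--         elif len(vs) == 2:
--             syms.append(vs[0] * 3 + vs[1])
--         else:
--             syms.append(vs[0])
--     return syms
--
-- def descsum_check(s, require=True):
--     """Verify that the checksum is correct in a descriptor"""
--     if "#" not in s:
--         return not require
--     if len(s) < 9 or s[-9] != "#":
--         return False
--     if any(c not in CHK_IDX for c in s[-8:]):
--         return False
--     syms = _expand(s[:-9])
--     if syms is None:
--         return False
--     return _polymod(syms + [CHK_IDX[c] for c in s[-8:]]) == 1
-- ===== Notes on version B (the rewrite author's own statement) =====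
-- stated objective: alternative
-- what changed: polymod's per-symbol inner 5-iteration generator loop is replaced by a precomputed 32-entry XOR table indexed by the 5-bit top, and the stateful groups-accumulator expansion is replaced by iteration over the body in chunks of three characters with dict-based charset lookup.
-- outside the precondition, e.g. on descsum_check('#', True): A raises IndexError, B returns False; on descsum_check('\t\t#qqqqqqqq', True): A raises TypeError, B returns False
import Mathlib
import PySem

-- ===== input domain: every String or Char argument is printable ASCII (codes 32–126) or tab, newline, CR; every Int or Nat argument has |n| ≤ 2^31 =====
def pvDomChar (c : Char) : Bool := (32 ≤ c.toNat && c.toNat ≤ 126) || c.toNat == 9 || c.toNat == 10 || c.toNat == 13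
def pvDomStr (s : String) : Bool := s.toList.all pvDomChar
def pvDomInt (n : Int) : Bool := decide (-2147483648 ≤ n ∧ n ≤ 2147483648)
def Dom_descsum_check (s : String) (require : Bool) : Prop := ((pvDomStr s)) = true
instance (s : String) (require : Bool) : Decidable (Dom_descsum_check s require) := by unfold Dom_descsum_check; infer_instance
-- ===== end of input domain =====

-- B replaces polymod's inner generator loop by a precomputed 32-entry XOR table and the
-- stateful groups accumulator of the expansion by iteration in chunks of three characters
-- (objective: alternative decomposition, same asymptotic cost).

-- ===== PORT A =====
def pvInputCharset : List Char :=
  "0123456789()[],'/*abcdefgh@:$%{}IJKLMNOPQRSTUVWXYZ&+-.;<=>?!^_|~ijklmnopqrstuvwxyzABCDEFGH`#\"\\ ".toList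

def pvChecksumCharset : List Char := "qpzry9x8gf2tvdw0s3jn54khce6mua7l".toList

def pvGenerator : List Nat := [0xF5DEE51989, 0xA9FDCA3312, 0x1BAB10E32D, 0x3706B1677A, 0x644D626FFD]

def descsumPolymod (symbols : List Nat) : Nat :=
  symbols.foldl (fun chk value =>
    let top := chk >>> 35
    let chk1 := ((chk &&& 0x7FFFFFFFF) <<< 5) ^^^ value
    (List.range 5).foldl
      (fun c i => c ^^^ (if (top >>> i) &&& 1 = 1 then pvGenerator.getD i 0 else 0)) chk1) 1

def descsumExpandAux : List Char → List Nat → List Nat → Option (List Nat)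
  | [], groups, symbols =>
    if groups.length = 1 then some (symbols ++ [groups.getD 0 0])
    else if groups.length = 2 then some (symbols ++ [groups.getD 0 0 * 3 + groups.getD 1 0])
    else some symbols
  | c :: cs, groups, symbols =>
    if pvInputCharset.contains c then
      let v := pvInputCharset.idxOf c
      let symbols' := symbols ++ [v &&& 31]
      let groups' := groups ++ [v >>> 5]
      if groups'.length = 3 then
        descsumExpandAux cs []
          (symbols' ++ [groups'.getD 0 0 * 9 + groups'.getD 1 0 * 3 + groups'.getD 2 0])
      else descsumExpandAux cs groups' symbols'
    else none

def descsumExpand (s : List Char) : Option (List Nat) := descsumExpandAux s [] []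

def descsum_check (s : String) (require : Bool) : Bool :=
  let cs := s.toList
  if ¬ cs.contains '#' then !require
  else
    match PySem.List.pyGet? cs (-9) with      -- s[-9]; none = IndexError, excluded by Pre_
    | none => false
    | some c9 =>
      if c9 ≠ '#' then false
      else if ¬ (PySem.List.slice cs (some (-8)) none).all (fun x => pvChecksumCharset.contains x) then false
      else
        match descsumExpand (PySem.List.slice cs none (some (-9))) with
        | none => false                        -- Python: None + list raises TypeError, excluded by Pre_
        | some syms =>
          decide (descsumPolymod
            (syms ++ (PySem.List.slice cs (some (-8)) none).map (fun x => pvChecksumCharset.idxOf x)) = 1)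

-- ===== PORT B =====
-- 32-entry table: XOR of the generator constants selected by each 5-bit "top".
def pvXorTable : List Nat :=
  (List.range 32).map (fun m =>
    (List.range 5).foldl
      (fun acc i => if (m >>> i) &&& 1 = 1 then acc ^^^ pvGenerator.getD i 0 else acc) 0)

def polymodB (symbols : List Nat) : Nat :=
  symbols.foldl (fun chk v => ((chk &&& 0x7FFFFFFFF) <<< 5) ^^^ v ^^^ pvXorTable.getD (chk >>> 35) 0) 1

-- chunk-of-three expansion; List.idxOf? is the port of INP_IDX.get (charset chars are distinct)
def expandB : List Char → Option (List Nat)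
  | [] => some []
  | [c1] => do
      let v1 ← pvInputCharset.idxOf? c1
      pure [v1 &&& 31, v1 >>> 5]
  | [c1, c2] => do
      let v1 ← pvInputCharset.idxOf? c1
      let v2 ← pvInputCharset.idxOf? c2
      pure [v1 &&& 31, v2 &&& 31, (v1 >>> 5) * 3 + (v2 >>> 5)]
  | c1 :: c2 :: c3 :: rest => do
      let v1 ← pvInputCharset.idxOf? c1
      let v2 ← pvInputCharset.idxOf? c2
      let v3 ← pvInputCharset.idxOf? c3
      let tail ← expandB rest
      pure ([v1 &&& 31, v2 &&& 31, v3 &&& 31,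
             (v1 >>> 5) * 9 + (v2 >>> 5) * 3 + (v3 >>> 5)] ++ tail)

def descsum_check_alt (s : String) (require : Bool) : Bool :=
  let cs := s.toList
  if ¬ cs.contains '#' then !require
  else if cs.length < 9 then false
  else if cs.getD (cs.length - 9) ' ' ≠ '#' then false
  else
    let check := cs.drop (cs.length - 8)
    if check.any (fun c => (pvChecksumCharset.idxOf? c).isNone) then false
    else
      match expandB (cs.take (cs.length - 9)) with
      | none => false
      | some syms =>
        decide (polymodB (syms ++ check.map (fun c => (pvChecksumCharset.idxOf? c).getD 0)) = 1)

-- ===== PRECONDITION & SPEC =====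
-- Pre_ excludes exactly the inputs on which A raises: a string containing '#' but shorter
-- than 9 characters (IndexError on s[-9]), and a string with '#' at position -9 and 8 valid
-- checksum characters whose body has a character outside INPUT_CHARSET (TypeError: None + list).
def Pre_descsum_check (s : String) (require : Bool) : Prop :=
  '#' ∈ s.toList →
    9 ≤ s.toList.length ∧
    ((s.toList.getD (s.toList.length - 9) ' ' = '#' ∧
        ∀ c ∈ s.toList.drop (s.toList.length - 8), c ∈ pvChecksumCharset) →
      ∀ c ∈ s.toList.take (s.toList.length - 9), c ∈ pvInputCharset)
instance (s : String) (require : Bool) : Decidable (Pre_descsum_check s require) := by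
  unfold Pre_descsum_check; infer_instance

def pvWitness_descsum_check : String × Bool := ("addr(abc)", true)

def Spec_descsum_check (s : String) (require : Bool) (out : Bool) : Prop := out = descsum_check_alt s require
instance (s : String) (require : Bool) (out : Bool) : Decidable (Spec_descsum_check s require out) := by
  unfold Spec_descsum_check; infer_instance

-- ===== CLAIM (what is proved, stated in full; the proofs are below) =====
def Claim_equal_descsum_check : Prop := ∀ (s : String) (require : Bool), Dom_descsum_check s require → Pre_descsum_check s require → Spec_descsum_check s require (descsum_check s require)

-- ===== LEMMAS AND PROOFS =====

lemma idxOf?_spec (l : List Char) (c : Char) :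
    l.idxOf? c = if l.contains c then some (l.idxOf c) else none := by
  induction l with
  | nil => simp
  | cons a t ih =>
    by_cases h : a = c
    · simp [h, List.idxOf?_cons]
    · by_cases hm : c ∈ t <;>
        simp [List.idxOf?_cons, ih, h, hm, Ne.symm h, beq_iff_eq]

lemma expandAux_eq (cs : List Char) : ∀ syms : List Nat,
    descsumExpandAux cs [] syms = (expandB cs).map (fun t => syms ++ t) := by
  induction cs using expandB.induct with
  | case1 => intro syms; simp [descsumExpandAux, expandB]
  | case2 c1 =>
    intro syms
    by_cases h1 : c1 ∈ pvInputCharset <;>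
      simp [descsumExpandAux, expandB, idxOf?_spec, h1]
  | case3 c1 c2 =>
    intro syms
    by_cases h1 : c1 ∈ pvInputCharset <;>
      by_cases h2 : c2 ∈ pvInputCharset <;>
        simp [descsumExpandAux, expandB, idxOf?_spec, h1, h2]
  | case4 c1 c2 c3 rest ih =>
    intro syms
    by_cases h1 : c1 ∈ pvInputCharset <;>
      by_cases h2 : c2 ∈ pvInputCharset <;>
        by_cases h3 : c3 ∈ pvInputCharset <;>
          simp [descsumExpandAux, expandB, idxOf?_spec, h1, h2, h3, ih]
    cases expandB rest <;> simp

lemma charset_len : pvInputCharset.length = 95 := by decide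

lemma idx_lt (c : Char) (h : c ∈ pvInputCharset) : pvInputCharset.idxOf c < 95 := by
  have := List.idxOf_lt_length_of_mem h
  rwa [charset_len] at this

lemma and31_lt (v : Nat) : v &&& 31 < 32 := by
  have : v &&& 31 ≤ 31 := Nat.and_le_right
  omega

lemma shr5_le (v : Nat) (h : v < 95) : v >>> 5 ≤ 2 := by
  rw [Nat.shiftRight_eq_div_pow]
  omega

lemma expandB_lt (cs : List Char) : ∀ t : List Nat, expandB cs = some t →
    ∀ v ∈ t, v < 32 := by
  induction cs using expandB.induct with
  | case1 => intro t h; simp [expandB] at h; subst h; simp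
  | case2 c1 =>
    intro t h
    by_cases h1 : c1 ∈ pvInputCharset
    · simp [expandB, idxOf?_spec, h1] at h
      have hv := idx_lt c1 h1
      have := and31_lt (pvInputCharset.idxOf c1)
      have := shr5_le _ hv
      intro v hvmem
      simp [← h] at hvmem
      rcases hvmem with h' | h' <;> omega
    · simp [expandB, idxOf?_spec, h1] at h
  | case3 c1 c2 =>
    intro t h
    by_cases h1 : c1 ∈ pvInputCharset <;> by_cases h2 : c2 ∈ pvInputCharset <;>
      simp [expandB, idxOf?_spec, h1, h2] at h
    have hv1 := idx_lt c1 h1; have hv2 := idx_lt c2 h2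
    have := and31_lt (pvInputCharset.idxOf c1); have := and31_lt (pvInputCharset.idxOf c2)
    have := shr5_le _ hv1; have := shr5_le _ hv2
    intro v hvmem
    simp [← h] at hvmem
    rcases hvmem with h' | h' | h' <;> omega
  | case4 c1 c2 c3 rest ih =>
    intro t h
    cases hrest : expandB rest with
    | none =>
      by_cases h1 : c1 ∈ pvInputCharset <;> by_cases h2 : c2 ∈ pvInputCharset <;>
        by_cases h3 : c3 ∈ pvInputCharset <;>
          simp [expandB, idxOf?_spec, h1, h2, h3, hrest] at h
    | some tail =>
      by_cases h1 : c1 ∈ pvInputCharset <;> by_cases h2 : c2 ∈ pvInputCharset <;>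
        by_cases h3 : c3 ∈ pvInputCharset <;>
          simp [expandB, idxOf?_spec, h1, h2, h3, hrest] at h
      have hv1 := idx_lt c1 h1; have hv2 := idx_lt c2 h2; have hv3 := idx_lt c3 h3
      have := and31_lt (pvInputCharset.idxOf c1); have := and31_lt (pvInputCharset.idxOf c2)
      have := and31_lt (pvInputCharset.idxOf c3)
      have := shr5_le _ hv1; have := shr5_le _ hv2; have := shr5_le _ hv3
      intro v hvmem
      simp [← h] at hvmem
      rcases hvmem with h' | h' | h' | h' | h'
      · omega
      · omega
      · omega
      · omega
      · exact ih tail hrest v h'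

lemma expandB_isSome (cs : List Char) (h : ∀ c ∈ cs, c ∈ pvInputCharset) :
    (expandB cs).isSome := by
  induction cs using expandB.induct with
  | case1 => simp [expandB]
  | case2 c1 =>
    have h1 : c1 ∈ pvInputCharset := h c1 (by simp)
    simp [expandB, idxOf?_spec, h1]
  | case3 c1 c2 =>
    have h1 : c1 ∈ pvInputCharset := h c1 (by simp)
    have h2 : c2 ∈ pvInputCharset := h c2 (by simp)
    simp [expandB, idxOf?_spec, h1, h2]
  | case4 c1 c2 c3 rest ih =>
    have h1 : c1 ∈ pvInputCharset := h c1 (by simp)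
    have h2 : c2 ∈ pvInputCharset := h c2 (by simp)
    have h3 : c3 ∈ pvInputCharset := h c3 (by simp)
    have hrest := ih (fun c hc => h c (by simp [hc]))
    obtain ⟨tail, htail⟩ := Option.isSome_iff_exists.mp hrest
    simp [expandB, idxOf?_spec, h1, h2, h3, htail]

def tblFun (m : Nat) : Nat :=
  (List.range 5).foldl
    (fun acc i => if (m >>> i) &&& 1 = 1 then acc ^^^ pvGenerator.getD i 0 else acc) 0

lemma fold_xor_shift (l : List Nat) (h : Nat → Nat) :
    ∀ c : Nat, l.foldl (fun a i => a ^^^ h i) c = c ^^^ l.foldl (fun a i => a ^^^ h i) 0 := by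
  induction l with
  | nil => simp
  | cons x t ih =>
    intro c
    simp only [List.foldl_cons]
    rw [ih (c ^^^ h x), ih (0 ^^^ h x), Nat.zero_xor, Nat.xor_assoc]

lemma xorTable_getD (m : Nat) (h : m < 32) : pvXorTable.getD m 0 = tblFun m := by
  have he : pvXorTable = (List.range 32).map tblFun := rfl
  rw [he, List.getD_eq_getElem?_getD, List.getElem?_map, List.getElem?_range h]
  rfl

lemma innerA_eq (chk m : Nat) :
    (List.range 5).foldl
      (fun c i => c ^^^ (if (m >>> i) &&& 1 = 1 then pvGenerator.getD i 0 else 0)) chk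
      = chk ^^^ tblFun m := by
  rw [fold_xor_shift (List.range 5) (fun i => if (m >>> i) &&& 1 = 1 then pvGenerator.getD i 0 else 0) chk]
  congr 1
  simp only [tblFun, List.range_succ, List.range_zero, List.nil_append,
    List.foldl_cons, List.foldl_append, List.foldl_nil]
  split_ifs <;> simp

lemma tblFun_lt : ∀ m, m < 32 → tblFun m < 2 ^ 40 := by decide

lemma polymod_aux (syms : List Nat) : ∀ chk : Nat, chk < 2 ^ 40 → (∀ v ∈ syms, v < 32) →
    syms.foldl (fun chk value =>
      let top := chk >>> 35
      let chk1 := ((chk &&& 0x7FFFFFFFF) <<< 5) ^^^ value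
      (List.range 5).foldl
        (fun c i => c ^^^ (if (top >>> i) &&& 1 = 1 then pvGenerator.getD i 0 else 0)) chk1) chk
    = syms.foldl (fun chk v => ((chk &&& 0x7FFFFFFFF) <<< 5) ^^^ v ^^^ pvXorTable.getD (chk >>> 35) 0) chk := by
  induction syms with
  | nil => intro chk _ _; rfl
  | cons v t ih =>
    intro chk hchk hall
    simp only [List.foldl_cons]
    have htop : chk >>> 35 < 32 := by
      rw [Nat.shiftRight_eq_div_pow]
      have h35 : (2:Nat) ^ 35 = 34359738368 := by norm_num
      have h40 : (2:Nat) ^ 40 = 1099511627776 := by norm_num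
      rw [h35]; omega
    have hv : v < 32 := hall v (by simp)
    have hbase : ((chk &&& 0x7FFFFFFFF) <<< 5) ^^^ v < 2 ^ 40 := by
      apply Nat.xor_lt_two_pow
      · rw [Nat.shiftLeft_eq]
        have hand : chk &&& 0x7FFFFFFFF ≤ 0x7FFFFFFFF := Nat.and_le_right
        have h40 : (2:Nat) ^ 40 = 1099511627776 := by norm_num
        have h5 : (2:Nat) ^ 5 = 32 := by norm_num
        rw [h5, h40]; omega
      · have h40 : (2:Nat) ^ 40 = 1099511627776 := by norm_num
        omega
    have hnew : (((chk &&& 0x7FFFFFFFF) <<< 5) ^^^ v) ^^^ tblFun (chk >>> 35) < 2 ^ 40 :=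
      Nat.xor_lt_two_pow hbase (tblFun_lt _ htop)
    rw [innerA_eq, xorTable_getD _ htop]
    exact ih _ hnew (fun w hw => hall w (by simp [hw]))

lemma polymod_eq (syms : List Nat) (h : ∀ v ∈ syms, v < 32) :
    descsumPolymod syms = polymodB syms := by
  unfold descsumPolymod polymodB
  exact polymod_aux syms 1 (by norm_num) h

lemma isNone_idxOf? (l : List Char) (c : Char) : (l.idxOf? c).isNone = !l.contains c := by
  rw [idxOf?_spec]; split <;> simp_all

lemma chkidx_lt (c : Char) (h : c ∈ pvChecksumCharset) : pvChecksumCharset.idxOf c < 32 := by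
  have := List.idxOf_lt_length_of_mem h
  have hl : pvChecksumCharset.length = 32 := by decide
  omega

lemma check_eq : ∀ (s : String) (require : Bool),
    ('#' ∈ s.toList →
      9 ≤ s.toList.length ∧
      ((s.toList.getD (s.toList.length - 9) ' ' = '#' ∧
          ∀ c ∈ s.toList.drop (s.toList.length - 8), c ∈ pvChecksumCharset) →
        ∀ c ∈ s.toList.take (s.toList.length - 9), c ∈ pvInputCharset)) →
    descsum_check s require = descsum_check_alt s require := by
  intro s require hpre
  by_cases hhash : '#' ∈ s.toList
  · obtain ⟨hlen, hbody⟩ := hpre hhash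
    have hlt : s.toList.length - 9 < s.toList.length := by omega
    have hget : PySem.List.pyGet? s.toList (-9) = some (s.toList[s.toList.length - 9]'hlt) := by
      rw [PySem.List.pyGet?_neg_ofNat s.toList 9 (by omega) (by omega)]
      simp
    have hgetD : s.toList.getD (s.toList.length - 9) ' ' = s.toList[s.toList.length - 9]'hlt :=
      List.getD_eq_getElem _ _ hlt
    have hslice8 : PySem.List.slice s.toList (some (-8)) none = s.toList.drop (s.toList.length - 8) := by
      rw [PySem.List.slice_from_neg_ofNat s.toList 8 (by omega)]
    have hslice9 : PySem.List.slice s.toList none (some (-9)) = s.toList.take (s.toList.length - 9) := by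
      rw [PySem.List.slice_to_neg_ofNat s.toList 9 (by omega)]
    simp only [descsum_check, descsum_check_alt, hhash, List.contains_iff_mem,
      not_true, if_false, hget, hslice8, hslice9, ite_not, descsumExpand]
    rw [if_neg (by omega : ¬ s.toList.length < 9), hgetD]
    by_cases hc9 : s.toList[s.toList.length - 9]'hlt = '#'
    · rw [if_pos hc9, if_pos hc9]
      by_cases hchk : ∀ c ∈ s.toList.drop (s.toList.length - 8), c ∈ pvChecksumCharset
      · have hall : ((s.toList.drop (s.toList.length - 8)).all fun x => pvChecksumCharset.contains x) = true := by
          simp only [List.all_eq_true, List.contains_iff_mem]; exact hchk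
        have hany : ((s.toList.drop (s.toList.length - 8)).any fun c => (List.idxOf? c pvChecksumCharset).isNone) = false := by
          simp only [List.any_eq_false]
          intro c hc
          simp [isNone_idxOf?, hchk c hc]
        rw [hall, if_pos rfl, hany, if_neg (by simp)]
        have hbodymem : ∀ c ∈ s.toList.take (s.toList.length - 9), c ∈ pvInputCharset :=
          hbody ⟨by rw [hgetD]; exact hc9, hchk⟩
        obtain ⟨syms, hsyms⟩ := Option.isSome_iff_exists.mp (expandB_isSome _ hbodymem)
        have hA : descsumExpandAux (s.toList.take (s.toList.length - 9)) [] [] = some syms := by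
          rw [expandAux_eq, hsyms]; simp only [Option.map_some, List.nil_append]
        rw [hA, hsyms]
        dsimp only
        have hmap : List.map (fun x => List.idxOf x pvChecksumCharset) (s.toList.drop (s.toList.length - 8))
            = List.map (fun c => (List.idxOf? c pvChecksumCharset).getD 0) (s.toList.drop (s.toList.length - 8)) := by
          apply List.map_congr_left
          intro c hc
          rw [idxOf?_spec, if_pos (by simpa using hchk c hc)]
          rfl
        rw [hmap, polymod_eq]
        intro v hv
        rcases List.mem_append.mp hv with hv | hv
        · exact expandB_lt _ syms hsyms v hv
        · obtain ⟨c, hc, rfl⟩ := List.mem_map.mp hv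
          rw [idxOf?_spec, if_pos (by simpa using hchk c hc)]
          exact chkidx_lt c (hchk c hc)
      · push Not at hchk
        obtain ⟨c, hc, hnc⟩ := hchk
        have hallf : ((s.toList.drop (s.toList.length - 8)).all fun x => pvChecksumCharset.contains x) = false := by
          simp only [List.all_eq_false]
          exact ⟨c, hc, by simpa using hnc⟩
        have hanyt : ((s.toList.drop (s.toList.length - 8)).any fun c => (List.idxOf? c pvChecksumCharset).isNone) = true := by
          simp only [List.any_eq_true]
          exact ⟨c, hc, by simp [isNone_idxOf?, hnc]⟩
        rw [hallf, if_neg (by simp), hanyt, if_pos rfl]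
    · rw [if_neg hc9, if_neg hc9]
  · simp [descsum_check, descsum_check_alt, hhash]

-- ===== VERDICT (by name: the statement is the Claim_ definition above) =====
theorem descsum_check_spec : Claim_equal_descsum_check := by
  intro s require _ hpre
  unfold Spec_descsum_check
  exact check_eq s require hpre
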